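/-
  SMOKE TESTS of Vorbis/Spec/StartDecoderB.lean (S-TEMPLATE, quality check 2: non-vacuity; check 3: the callees' preconditions
  follow from the assertions). Nothing here is used by a proof.

      the hand-over          `BodyF1` (S4's exit of C16) gives the point `Mid g 5 5 5` that segment F1 starts from
      a reader's pre         `ReaderPre` of `get_bits` / `flush_packet` (S2) at a call from a cut point with `Mid`
      an allocator's pre     `ArenaPre` of `setup_malloc` (S1) at a call from a cut point with `Mid`
      error.spec's pre       `LiveIn … f 1808`
      an error exit          `Failed` from `Mid` in the floor section (H2, H3, H5 from the zero rest), in the mode section (from the groups)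
      the success exit       `Done` from R19's body; `Separated` and "owned ⇒ arena" from `Done`
      the loop heads         `i ≤ 64` at F2 / R2 / R8 / R13, `i ≤ 16` at R15: the composition's measures
-/
import Vorbis.Spec.StartDecoderB
import Vorbis.Spec.Reader
namespace Vorbis.Spec.StartDecoder
open X86 X86.User Asan

variable {u₀ : State} {g : Ghost} {A : Arena × List Obj} {v s : State}

/-- The live objects inside the function contain those of the callers. -/
theorem frames'_sub (g : Ghost) (others : List Obj) (o : Obj) (ho : o ∈ stackObjs g.frames ++ others) :
    o ∈ stackObjs g.frames' ++ others := by
  unfold Ghost.frames'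
  rw [stackObjs_cons]
  rcases List.mem_append.mp ho with h1 | h2
  · exact List.mem_append_left _ (List.mem_append_right _ h1)
  · exact List.mem_append_right _ h2

/-- The hand-over: S4's `BodyF1` gives the point inside the floor section's first segment. -/
example (h : BodyF1 u₀ g A v) : Mid g 5 5 5 A.1 A v.mem := Mid.of_sd5 h.sd h.own

/-- **S2's `ReaderEnv`** (the memory-independent part of every reader's pre) from `hand` and the point's environment. -/
theorem readerEnv_mid {k kc z : Nat} {Ac : Arena} {mem : Mem} (hh : g.Hand A) (hm : Mid g k kc z Ac A mem) :
    ReaderEnv A.2 g.frames' (g.Blk A) g.len g.f :=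
  ⟨hm.env.live, hh.obj.mono (frames'_sub g A.2), fun hl => (hh.inp hl).mono (frames'_sub g A.2)⟩

/-- **The shadow clause of a callee's pre** at the state `s` right after a `call` from a cut point (`rsp = R − 8`; the pushed return
address is no shadow byte). -/
theorem shadowPre_call {pc : Word} (hf : Frame u₀ g pc A v) (hrsp : (s.reg .rsp).toNat + 8 = g.R)
    (hun : ShadowUntouched v.mem s.mem) : ShadowPre A.2 g.frames' s := by
  refine ⟨?_, hf.offText⟩
  rw [hrsp]
  exact hf.shadow.untouched hun

/-- **`ReaderPre` of `get_bits(f, n)`** at a call from a cut point of the floor / residue / mapping / mode sections (`rdi = f`). -/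
example {pc : Word} {k kc z : Nat} {Ac : Arena} (hf : Frame u₀ g pc A v) (hh : g.Hand A) (hm : Mid g k kc z Ac A v.mem)
    (hrsp : (s.reg .rsp).toNat + 8 = g.R) (hun : ShadowUntouched v.mem s.mem) (hrdi : (s.reg .rdi).toNat = g.f)
    (hbits : Bits (g.Blk A) g.len s.mem g.f) : ReaderPre A.2 g.frames' (g.Blk A) g.len s := by
  refine ⟨shadowPre_call hf hrsp hun, ?_, ?_⟩
  · rw [hrdi]
    exact readerEnv_mid hh hm
  · rw [hrdi]
    exact hbits

/-- **`ArenaPre` of `setup_malloc(f, sz)`** (S1) at a call from a cut point (`rdi = f`; the arena layer carried to `s.mem`). -/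
example {pc : Word} (hf : Frame u₀ g pc A v) (hh : g.Hand A)
    (hrsp : (s.reg .rsp).toNat + 8 = g.R) (hun : ShadowUntouched v.mem s.mem) (hrdi : (s.reg .rdi).toNat = g.f)
    (ha : ArenaOK A.1 A.2 s.mem g.f) : ArenaPre A.1 A.2 g.frames' s := by
  refine ⟨shadowPre_call hf hrsp hun, ?_, ?_, hh.arenaText⟩
  · rw [hrdi]
    exact (hh.obj.mono (frames'_sub g A.2)).blockLive
  · rw [hrdi]
    exact ha

/-- **`error.spec`'s pre** (`LiveIn others frames f 1808`) at a call from a cut point. -/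
example {pc : Word} (hf : Frame u₀ g pc A v) (hh : g.Hand A)
    (hrsp : (s.reg .rsp).toNat + 8 = g.R) (hun : ShadowUntouched v.mem s.mem) (hrdi : (s.reg .rdi).toNat = g.f) :
    (error.spec A.2 g.frames').pre s := by
  refine ⟨shadowPre_call hf hrsp hun, ?_⟩
  rw [hrdi]
  exact hh.obj.mono (frames'_sub g A.2)

/-- **`ilog.spec`'s pre** (R10): the global `log2_4` is a live object. -/
example {pc : Word} (hf : Frame u₀ g pc A v) (hh : g.Hand A)
    (hrsp : (s.reg .rsp).toNat + 8 = g.R) (hun : ShadowUntouched v.mem s.mem) : (ilog.spec A.2 g.frames').pre s := by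
  refine ⟨shadowPre_call hf hrsp hun, hh.globals _ ?_⟩
  decide

/-- An error exit of the floor section (F2's `error(f, VORBIS_invalid_setup)`): H2, H3, H5 from the zero rest. -/
example {i : Nat} {A5 : Arena} (h : BodyF2 u₀ g i A5 A v) : Failed g.len g.f (g.Live A) A v.mem :=
  h.mid.failed (by omega) (h.mid.h2_null (by omega) _) (h.mid.h3_null (by omega) _) (h.mid.h5_null (by omega) _)

/-- An error exit at the head of the residue loop (R2's `error(f, VORBIS_outofmem)` after the mapping allocation failed: `i = rc`):
H2, H3 from RES(i), H5 from the zero rest. -/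
example {i : Nat} {A6 A6c : Arena} (h : BodyR2 u₀ g i A6 A6c A v) : Failed g.len g.f (g.Live A) A v.mem := by
  have hd : ResidueDeinitOK A.1.Blk v.mem g.f :=
    h.loop.res.upTo.deinit_head h.loop.zero (h.loop.mid.own.nonnull (by omega))
  have h2 : H2 (g.Blk A) v.mem g.f := H2.mono (ResidueDeinitOK.h2 hd h.loop.res.R1.2) (fun _ hB => runBlk_setup hB)
  have h3 : H3 (g.Blk A) v.mem g.f := H3.mono (ResidueDeinitOK.h3 hd) (fun _ hB => runBlk_setup hB)
  exact h.loop.mid.failed (by omega) h2 h3 (h.loop.mid.h5_null (by omega) _)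

/-- An error exit inside a residue record (R5's `error` after a bad `residue_books` entry): the record under construction has
`classdata = NULL` (`zero` from `i` on). -/
example {i : Nat} {A6 A6c Ai : Arena} (h : BodyR5 u₀ g i A6 A6c Ai A v) : Failed g.len g.f (g.Live A) A v.mem := by
  have hd : ResidueDeinitOK A.1.Blk v.mem g.f :=
    h.loop.res.upTo.deinit_head h.loop.zero (h.loop.mid.own.nonnull (by omega))
  have h2 : H2 (g.Blk A) v.mem g.f := H2.mono (ResidueDeinitOK.h2 hd h.loop.res.R1.2) (fun _ hB => runBlk_setup hB)
  have h3 : H3 (g.Blk A) v.mem g.f := H3.mono (ResidueDeinitOK.h3 hd) (fun _ hB => runBlk_setup hB)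
  exact h.loop.mid.failed (by omega) h2 h3 (h.loop.mid.h5_null (by omega) _)

/-- An error exit of R7 (`classdata[j] = NULL`): record `i` has R7 and `Block(classdata, 8·E)` (`ResidueUpTo.deinit`'s `hcur`). -/
example {i : Nat} {A6 A6c Ai Ak : Arena} (h : BodyR7 u₀ g i A6 A6c Ai Ak A v) : Failed g.len g.f (g.Live A) A v.mem := by
  have hd : ResidueDeinitOK A.1.Blk v.mem g.f := by
    apply h.loop.res.upTo.deinit h.loop.zero (h.loop.mid.own.nonnull (by omega))
    intro _
    exact Or.inr ⟨h.cur.R7, (h.cur.R8a (by omega)).1⟩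
  have h2 : H2 (g.Blk A) v.mem g.f := H2.mono (ResidueDeinitOK.h2 hd h.loop.res.R1.2) (fun _ hB => runBlk_setup hB)
  have h3 : H3 (g.Blk A) v.mem g.f := H3.mono (ResidueDeinitOK.h3 hd) (fun _ hB => runBlk_setup hB)
  exact h.loop.mid.failed (by omega) h2 h3 (h.loop.mid.h5_null (by omega) _)

/-- An error exit of the mapping section (R9 … R12): H5 from MAPS(i). -/
example {i : Nat} {A7 A7c : Arena} (h : BodyR9 u₀ g i A7 A7c A v) : Failed g.len g.f (g.Live A) A v.mem := by
  have h5 : H5 (g.Blk A) v.mem g.f :=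
    H5.mono (MappingDeinitOK.h5 h.loop.maps.upTo.deinit h.loop.maps.MP1.2) (fun _ hB => runBlk_setup hB)
  exact h.loop.mid.failed (by omega) (h.loop.mid.h2_done (by omega)) (h.loop.mid.h3_done (by omega)) h5

/-- An error exit of the mode section, the channel loop, the two init_blocksize. -/
example {i : Nat} (h : BodyR14 u₀ g i A v) : Failed g.len g.f (g.Live A) A v.mem := h.loop.mid.failed_late (by omega)

/-- An error exit of the channel loop (R16's joint NULL test). -/
example {i : Nat} {A9 : Arena} (h : BodyR16 u₀ g i A9 A v) : Failed g.len g.f (g.Live A) A v.mem :=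
  h.loop.mid.failed_late (by omega)

/-- **The success exit**: R19's body is `Done` (the two stores of `first_audio_page_offset` lie in a decode-time hole of `*f`). -/
example {A9 A10 : Arena} (h : BodyR19 u₀ g A9 A10 A v) : Done g.len g.f (g.Live A) A v.mem := h.late.done h.temp h.final

/-- **`Separated` at SD.12** and "every owned block is an arena block", from `Done` and `hand`. -/
example {Live : Nat → Prop} (hd : Done g.len g.f Live A v.mem) (hh : g.Hand A) :
    Separated (g.Blk A) v.mem g.f ∧ ConfigOK A.1.Blk v.mem g.f :=
  ⟨hd.separated hh.objOut, hd.config_arena⟩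

/-- The measure of the floor loop: `i ≤ floor_count ≤ 64` at its head. -/
example {i : Nat} {A5 : Arena} (h : BodyF2 u₀ g i A5 A v) : i ≤ 64 := by
  have h1 := h.floors.FL1
  have h2 := h.i_le
  omega

/-- The measure of the residue loop. -/
example {i : Nat} {A6 A6c : Arena} (h : BodyR2 u₀ g i A6 A6c A v) : i ≤ 64 := by
  have h1 := h.loop.res.R1
  have h2 := h.loop.i_le
  omega

/-- The measure of the mapping loop. -/
example {i : Nat} {A7 A7c : Arena} (h : BodyR8 u₀ g i A7 A7c A v) : i ≤ 64 := by
  have h1 := h.maps.MP1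
  have h2 := h.i_le
  omega

/-- The measure of the mode loop. -/
example {i : Nat} (h : BodyR13 u₀ g i A v) : i ≤ 64 := by
  have h1 := h.modes.MD1
  have h2 := h.i_le
  omega

/-- The measure of the channel loop (HD1: `channels ≤ 16`). -/
example {i : Nat} {A9 : Arena} (h : BodyR15 u₀ g i A9 A v) : i ≤ 16 := by
  have h1 := h.mid.header.HD1
  have h2 := h.i_le
  omega

/-- The measure of the estimate loop. -/
example {i : Nat} {A9 A10 : Arena} (h : BodyR17 u₀ g i A9 A10 A v) : i ≤ 64 := by
  have h1 := (h.late.own.cfg.residue (by omega)).R1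
  have h2 := h.i_le
  omega

end Vorbis.Spec.StartDecoder
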